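-- pv_equiv track=rewrite | github.com/shawnr-ca/WikipediaPhilosophyWebCrawler | WikipediaPhilosophyWebFlowChart.py | FixEntry
-- ===== SOURCE A (Python) =====
-- def FixEntry(Entry):     #Function to change user input to searchable URL format for request
-- 	Fixed = ""
-- 	for char in range(len(Entry)):
-- 		newchar = Entry[char]
-- 		if char == 0:
-- 			newchar = Entry[char].upper()
-- 		elif Entry[char-1] != " " and Entry[char].isupper():
-- 			newchar = Entry[char].lower()
-- 		if Entry[char-1] == " ":
-- 			newchar = Entry[char].upper()
-- 		if Entry[char] == " ":
-- 			newchar = "_"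
-- 		Fixed += newchar
-- 	return Fixed
-- ===== SOURCE B (Python) =====
-- def FixEntry(Entry):     # word-level pipeline: split on spaces, capitalize each word, rejoin with underscores
--     return "_".join(word.capitalize() for word in Entry.split(" "))
-- ===== Notes on version B (the rewrite author's own statement) =====
-- stated objective: simpler
-- what changed: Replaced the index-based character loop (previous-char and first-index checks, repeated string +=) by a one-line word-level pipeline: split on spaces, capitalize each word, join with underscores.
import Mathlib
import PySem

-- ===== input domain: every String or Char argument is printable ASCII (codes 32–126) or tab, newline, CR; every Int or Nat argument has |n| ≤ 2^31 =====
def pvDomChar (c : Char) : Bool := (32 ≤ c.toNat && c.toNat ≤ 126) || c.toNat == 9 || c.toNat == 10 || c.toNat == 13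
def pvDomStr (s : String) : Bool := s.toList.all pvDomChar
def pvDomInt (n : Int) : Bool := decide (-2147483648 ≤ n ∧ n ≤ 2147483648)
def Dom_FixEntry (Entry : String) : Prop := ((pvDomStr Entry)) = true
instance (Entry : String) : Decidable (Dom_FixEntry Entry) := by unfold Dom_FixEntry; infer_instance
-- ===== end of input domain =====

-- B replaces A's index loop (with previous-char lookups) by a word-level split/capitalize/join pipeline; objective: simpler.


-- ===== PORT A =====
-- loop body of A; indices are always in range inside the loop (ch ∈ [0, len), ch-1 ∈ [-1, len)
-- with the list nonempty there, and Python's negative index -1 = last element is what pyGetD gives), so pyGetD is exact here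
def pvStepA (cs : List Char) (Fixed : List Char) (ch : Int) : List Char :=
  let c := PySem.List.pyGetD cs ch ' '
  let newchar := c
  let newchar := if ch = 0 then PySem.Chars.upperChar c
    else if PySem.List.pyGetD cs (ch - 1) ' ' ≠ ' ' ∧ PySem.Chars.isupper c then PySem.Chars.lowerChar c
    else newchar
  let newchar := if PySem.List.pyGetD cs (ch - 1) ' ' = ' ' then PySem.Chars.upperChar c else newchar
  let newchar := if c = ' ' then '_' else newchar
  Fixed ++ [newchar]

def FixEntry (Entry : String) : String :=
  String.mk ((PySem.List.pyRange 0 (PySem.Chars.len Entry.toList) 1).foldl (pvStepA Entry.toList) [])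

-- ===== PORT B =====
-- str.capitalize(): first char uppercased, rest lowercased (exact on the ASCII domain)
def pvCapitalize (w : List Char) : List Char :=
  match w with
  | [] => []
  | c :: rest => PySem.Chars.upperChar c :: PySem.Chars.lower rest

-- Entry.split(" ") with a one-char separator is List.splitOn ' '; "_".join is List.intercalate ['_']
def FixEntry_alt (Entry : String) : String :=
  String.mk (List.intercalate ['_'] ((Entry.toList.splitOn ' ').map pvCapitalize))

-- ===== PRECONDITION & SPEC =====
def Spec_FixEntry (Entry : String) (out : String) : Prop := out = FixEntry_alt Entry
instance (Entry : String) (out : String) : Decidable (Spec_FixEntry Entry out) := by unfold Spec_FixEntry; infer_instance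

-- ===== CLAIM (what is proved, stated in full; the proofs are below) =====
def Claim_equal_FixEntry : Prop := ∀ (Entry : String), Dom_FixEntry Entry → Spec_FixEntry Entry (FixEntry Entry)

-- ===== LEMMAS AND PROOFS =====

-- the common per-character behaviour of both programs: `start` = "at position 0 or right after a space"
def pvChunk : Bool → List Char → List Char
  | _, [] => []
  | start, c :: rest =>
    (if c = ' ' then '_'
     else if start then PySem.Chars.upperChar c
     else if PySem.Chars.isupper c then PySem.Chars.lowerChar c else c) :: pvChunk (c == ' ') rest

theorem pvLowerChar_eq (c : Char) :
    (if PySem.Chars.isupper c then PySem.Chars.lowerChar c else c) = PySem.Chars.lowerChar c := by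
  simp only [PySem.Chars.lowerChar]
  by_cases h : PySem.Chars.isupper c = true <;> simp [h]

theorem pvIntercalate_cons_of_ne_nil {α : Type} (sep x : List α) (l : List (List α)) (h : l ≠ []) :
    List.intercalate sep (x :: l) = x ++ sep ++ List.intercalate sep l := by
  cases l with
  | nil => exact absurd rfl h
  | cons y ys => simp [List.intercalate, List.intersperse]

theorem pvIntercalate_cons_head {α : Type} (sep : List α) (c : α) (t : List α) (l : List (List α)) :
    List.intercalate sep ((c :: t) :: l) = c :: List.intercalate sep (t :: l) := by
  cases l with
  | nil => simp [List.intercalate]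
  | cons y ys => simp [List.intercalate, List.intersperse]

-- head of the split list capitalized (at a word start) or lowercased (mid-word), the rest capitalized
def pvMapHead : Bool → List (List Char) → List (List Char)
  | _, [] => []
  | start, w :: ws =>
    (if start then pvCapitalize w else PySem.Chars.lower w) :: ws.map pvCapitalize

-- B computes pvChunk
theorem pvChunk_eq_split (cs : List Char) : ∀ start : Bool,
    pvChunk start cs = List.intercalate ['_'] (pvMapHead start (cs.splitOn ' ')) := by
  induction cs with
  | nil =>
    intro start
    simp [List.splitOn, List.splitOnP_nil, pvChunk, pvMapHead, pvCapitalize, PySem.Chars.lower,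
      List.intercalate]
  | cons c rest ih =>
    intro start
    by_cases hc : c = ' '
    · subst hc
      have hsplit : ((' ' :: rest).splitOn ' ') = [] :: rest.splitOn ' ' := by
        simp [List.splitOn, List.splitOnP_cons]
      rw [hsplit]
      have hne : rest.splitOn ' ' ≠ [] := List.splitOnP_ne_nil _ _
      have hmh : pvMapHead true (rest.splitOn ' ') = (rest.splitOn ' ').map pvCapitalize := by
        cases h : rest.splitOn ' ' with
        | nil => exact absurd h hne
        | cons w ws => simp [pvMapHead]
      have hl : pvChunk start (' ' :: rest) = '_' :: pvChunk true rest := by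
        rw [pvChunk]; simp
      rw [hl, ih true, hmh]
      have hmh2 : pvMapHead start ([] :: rest.splitOn ' ')
          = [] :: (rest.splitOn ' ').map pvCapitalize := by
        cases start <;> simp [pvMapHead, pvCapitalize, PySem.Chars.lower]
      rw [hmh2, pvIntercalate_cons_of_ne_nil _ _ _ (by simp [hne])]
      simp
    · have hsplit : ((c :: rest).splitOn ' ') = List.modifyHead (List.cons c) (rest.splitOn ' ') := by
        simp only [List.splitOn, List.splitOnP_cons]
        rw [if_neg (by simp [hc])]
      rw [hsplit]
      cases h : rest.splitOn ' ' with
      | nil => exact absurd h (List.splitOnP_ne_nil _ _)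
      | cons w ws =>
        simp only [List.modifyHead]
        have hmh : pvMapHead start ((c :: w) :: ws)
            = ((if start then PySem.Chars.upperChar c else PySem.Chars.lowerChar c)
                :: PySem.Chars.lower w) :: ws.map pvCapitalize := by
          cases start <;> simp [pvMapHead, pvCapitalize, PySem.Chars.lower]
        have hflag : (c == ' ') = false := by simp [hc]
        have hl : pvChunk start (c :: rest)
            = (if start then PySem.Chars.upperChar c else PySem.Chars.lowerChar c)
              :: pvChunk false rest := by
          rw [pvChunk, if_neg hc, hflag]
          cases start <;> simp [pvLowerChar_eq]
        rw [hl, hmh, pvIntercalate_cons_head, ih false, h]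
        simp [pvMapHead]

-- A's loop from index k ≥ 1 onwards computes pvChunk of the suffix
theorem pvFoldA (cs : List Char) : ∀ (m k : Nat) (acc : List Char), k + m = cs.length → 1 ≤ k →
    (PySem.List.pyRange (k : Int) (cs.length : Int) 1).foldl (pvStepA cs) acc
      = acc ++ pvChunk ((cs[k - 1]?).getD ' ' == ' ') (cs.drop k) := by
  intro m
  induction m with
  | zero =>
    intro k acc hk _
    rw [show (PySem.List.pyRange (k : Int) (cs.length : Int) 1) = []
      from PySem.List.pyRange_one_eq_nil (by omega)]
    rw [List.drop_eq_nil_of_le (by omega)]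
    simp [pvChunk]
  | succ m ih =>
    intro k acc hk hk1
    have hklt : k < cs.length := by omega
    rw [show (PySem.List.pyRange (k : Int) (cs.length : Int) 1)
        = (k : Int) :: PySem.List.pyRange ((k : Int) + 1) (cs.length : Int) 1
      from PySem.List.pyRange_one_cons (by exact_mod_cast hklt)]
    rw [List.foldl_cons]
    have hget : PySem.List.pyGetD cs (k : Int) ' ' = cs[k] := by
      rw [PySem.List.pyGetD_natCast]
      exact List.getD_eq_getElem cs ' ' hklt
    have hprev : PySem.List.pyGetD cs ((k : Int) - 1) ' ' = (cs[k - 1]?).getD ' ' := by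
      have h1 : ((k : Int) - 1) = ((k - 1 : Nat) : Int) := by omega
      rw [h1, PySem.List.pyGetD_natCast]
      simp [List.getD]
    have hk0 : ¬((k : Int) = 0) := by omega
    have hstep : pvStepA cs acc (k : Int) = acc ++
        [if cs[k] = ' ' then '_'
         else if (cs[k - 1]?).getD ' ' == ' ' then PySem.Chars.upperChar cs[k]
         else if PySem.Chars.isupper cs[k] then PySem.Chars.lowerChar cs[k] else cs[k]] := by
      simp only [pvStepA, hget, hprev, if_neg hk0]
      by_cases hsp : cs[k] = ' ' <;> by_cases hp : (cs[k - 1]?).getD ' ' = ' ' <;>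
        simp [hsp, hp]
    rw [hstep]
    have hcast : ((k : Int) + 1) = ((k + 1 : Nat) : Int) := by omega
    rw [hcast, ih (k + 1) _ (by omega) (by omega)]
    have hdrop : cs.drop k = cs[k] :: cs.drop (k + 1) :=
      List.drop_eq_getElem_cons hklt
    rw [hdrop]
    have hd1 : (cs[k + 1 - 1]?).getD ' ' = cs[k] := by
      simp [hklt]
    rw [hd1, pvChunk]
    simp only [List.append_assoc, List.cons_append, List.nil_append]

-- A computes pvChunk
theorem pvA_eq_chunk (cs : List Char) :
    (PySem.List.pyRange 0 (PySem.Chars.len cs) 1).foldl (pvStepA cs) [] = pvChunk true cs := by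
  cases cs with
  | nil => simp [PySem.List.pyRange_one_eq_nil, pvChunk, PySem.Chars.len]
  | cons c rest =>
    have hlen : PySem.Chars.len (c :: rest) = ((c :: rest).length : Int) := by
      simp
    rw [hlen]
    have hpos : (0 : Int) < ((c :: rest).length : Int) := by
      simp
    rw [PySem.List.pyRange_one_cons hpos, List.foldl_cons]
    have hstep : pvStepA (c :: rest) [] 0 = [if c = ' ' then '_' else PySem.Chars.upperChar c] := by
      simp only [pvStepA]
      have hget : PySem.List.pyGetD (c :: rest) 0 ' ' = c := PySem.List.pyGetD_zero_cons _ _ _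
      rw [hget]
      by_cases hsp : c = ' ' <;>
        by_cases hp : PySem.List.pyGetD (c :: rest) (0 - 1) ' ' = ' ' <;>
        simp [hsp, hp]

    rw [hstep]
    have h01 : (0 : Int) + 1 = ((1 : Nat) : Int) := by norm_num
    rw [h01, pvFoldA (c :: rest) rest.length 1 _ (by simp only [List.length_cons]; omega) (le_refl 1)]
    rw [pvChunk]
    by_cases hsp : c = ' ' <;> simp [hsp]

-- ===== VERDICT (by name: the statement is the Claim_ definition above) =====
theorem FixEntry_spec : Claim_equal_FixEntry := by
  intro Entry _
  show FixEntry Entry = FixEntry_alt Entry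
  unfold FixEntry FixEntry_alt
  rw [pvA_eq_chunk, pvChunk_eq_split Entry.toList true]
  have hne : Entry.toList.splitOn ' ' ≠ [] := List.splitOnP_ne_nil _ _
  congr 1
  cases h : Entry.toList.splitOn ' ' with
  | nil => exact absurd h hne
  | cons w ws => simp [pvMapHead]
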